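-- pv_equiv track=rewrite | github.com/ennui2342/zettelkasten | src/zettelkasten/note.py | _split_title_body
-- ===== SOURCE A (Python) =====
-- def _split_title_body(content: str) -> tuple[str, str]:
--     """Extract the first # heading as title; remainder is body."""
--     lines = content.split("\n")
--     title = ""
--     body_start = 0
--     for i, line in enumerate(lines):
--         if line.startswith("# "):
--             title = line[2:].strip()
--             # skip blank line after heading
--             body_start = i + 1
--             while body_start < len(lines) and lines[body_start].strip() == "":
--                 body_start += 1
--             break
--     body = "\n".join(lines[body_start:]).strip()
--     return title, body
-- ===== SOURCE B (Python) =====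
-- def _split_title_body(content: str) -> tuple[str, str]:
--     """Extract the first # heading as title; remainder is body."""
--     def go(s):
--         # s is a suffix of content starting at a line boundary
--         parts = s.split("\n", 1)
--         line = parts[0]
--         if line.startswith("# "):
--             rest = parts[1] if len(parts) == 2 else ""
--             return line[2:].strip(), rest.strip()
--         if len(parts) == 1:
--             return None
--         return go(parts[1])
--     r = go(content)
--     if r is None:
--         return "", content.strip()
--     return r
-- ===== Notes on version B (the rewrite author's own statement) =====
-- stated objective: alternative
-- what changed: Replaces A's split-into-a-line-list with index arithmetic (enumerate scan plus a while loop skipping blank lines by index) by a recursion on string suffixes at line boundaries, splitting off one line at a time with maxsplit-1 split; the blank-line-skipping loop disappears because the trailing strip() subsumes it.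
import Mathlib
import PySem

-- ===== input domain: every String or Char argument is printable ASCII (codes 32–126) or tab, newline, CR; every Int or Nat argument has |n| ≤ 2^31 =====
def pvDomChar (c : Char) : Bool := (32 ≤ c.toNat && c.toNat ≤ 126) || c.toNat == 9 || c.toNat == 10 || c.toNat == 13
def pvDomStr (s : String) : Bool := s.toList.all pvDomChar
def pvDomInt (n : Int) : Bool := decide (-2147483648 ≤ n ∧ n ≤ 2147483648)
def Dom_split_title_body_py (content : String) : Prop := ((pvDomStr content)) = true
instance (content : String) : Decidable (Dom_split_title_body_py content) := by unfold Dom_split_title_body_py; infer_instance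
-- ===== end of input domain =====

-- B replaces A's line list + index arithmetic by a recursion on suffixes via split("\n", 1): an alternative decomposition of the same cost; the return value is proved equal for all strings.

-- ===== PORT A =====
-- the 'while body_start < len(lines) and lines[body_start].strip() == "": body_start += 1' loop
def pvA_while (lines : List (List Char)) (b : Nat) : Nat :=
  if b < lines.length ∧ PySem.Chars.strip (lines.getD b []) = [] then
    pvA_while lines (b + 1)
  else b
termination_by lines.length - b
decreasing_by omega

-- the 'for i, line in enumerate(lines): …' loop (break returns title and body_start; falling off leaves ("", 0))
def pvA_for (lines : List (List Char)) (i : Nat) : List (List Char) → List Char × Nat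
  | [] => ([], 0)
  | line :: rest =>
    if PySem.Chars.startswith line ['#', ' '] then
      (PySem.Chars.strip (PySem.Chars.slice line (some 2) none), pvA_while lines (i + 1))
    else pvA_for lines (i + 1) rest

def split_title_body_py (content : String) : String × String :=
  let lines := PySem.Chars.splitOn content.toList ['\n']
  let r := pvA_for lines 0 lines
  (String.ofList r.1, String.ofList (PySem.Chars.strip (PySem.Chars.join ['\n'] (lines.drop r.2))))

-- ===== PORT B =====
-- scan characterisation of s.split("\n", 1) — the next four lemmas are cited by pvB_go's termination proof
def pvSplitOnce : List Char → List Char × Option (List Char)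
  | [] => ([], none)
  | a :: rest =>
    if a = '\n' then ([], some rest)
    else ((a :: (pvSplitOnce rest).1), (pvSplitOnce rest).2)

theorem pvSplitOnMax_go_zero (fuel : Nat) (l cur : List Char) (acc : List (List Char)) :
    PySem.Chars.splitOnMax.go ['\n'] fuel 0 l cur acc = ((cur.reverse ++ l) :: acc).reverse := by
  cases fuel with
  | zero => rw [PySem.Chars.splitOnMax.go]
  | succ f => cases l with
    | nil => rw [PySem.Chars.splitOnMax.go]; simp; omega
    | cons c rest => rw [PySem.Chars.splitOnMax.go]; simp

theorem pvSplitOnMax_go_one (l : List Char) : ∀ (fuel : Nat) (cur : List Char) (acc : List (List Char)),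
    l.length ≤ fuel →
    PySem.Chars.splitOnMax.go ['\n'] fuel 1 l cur acc =
      acc.reverse ++ (match pvSplitOnce l with
        | (h, none) => [cur.reverse ++ h]
        | (h, some t) => [cur.reverse ++ h, t]) := by
  induction l with
  | nil =>
    intro fuel cur acc h
    cases fuel with
    | zero => rw [PySem.Chars.splitOnMax.go]; simp [pvSplitOnce]
    | succ f => rw [PySem.Chars.splitOnMax.go]; simp [pvSplitOnce]; omega
  | cons a rest ih =>
    intro fuel cur acc h
    cases fuel with
    | zero => simp at h
    | succ f =>
      rw [PySem.Chars.splitOnMax.go]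
      by_cases ha : a = '\n'
      · subst ha
        simp [List.isPrefixOf, pvSplitOnce, pvSplitOnMax_go_zero]
      · simp only [List.isPrefixOf, ha, Ne.symm ha, beq_iff_eq, if_false, Bool.and_eq_true, decide_eq_true_eq, false_and, if_neg, reduceIte]
        rw [ih f (a :: cur) acc (by simpa using h)]
        rcases hsp : pvSplitOnce rest with ⟨h1, _ | t⟩ <;> simp [pvSplitOnce, ha, hsp]

theorem pvSplitOnMax_one (s : List Char) :
    PySem.Chars.splitOnMax s ['\n'] 1 =
      (match pvSplitOnce s with
        | (h, none) => [h]
        | (h, some t) => [h, t]) := by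
  rw [PySem.Chars.splitOnMax]
  norm_num
  rw [pvSplitOnMax_go_one s (s.length + 1) [] [] (by omega)]
  rcases hsp : pvSplitOnce s with ⟨h1, _ | t⟩ <;> simp

theorem pvSplitOnce_some_length (s t : List Char) (h : (pvSplitOnce s).2 = some t) :
    t.length < s.length := by
  induction s with
  | nil => simp [pvSplitOnce] at h
  | cons a rest ih =>
    by_cases ha : a = '\n'
    · simp [pvSplitOnce, ha] at h; subst h; simp
    · simp [pvSplitOnce, ha] at h
      have := ih h
      simp; omega

theorem pvSplitOnMax_getD_length' (s : List Char)
    (h : ¬ (PySem.Chars.splitOnMax s ['\n'] 1).length = 1) :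
    ((PySem.Chars.splitOnMax s ['\n'] 1).getD 1 []).length < s.length := by
  rw [pvSplitOnMax_one] at *
  rcases hsp : pvSplitOnce s with ⟨h1, _ | t⟩
  · simp [hsp] at h
  · have := pvSplitOnce_some_length s t (by rw [hsp])
    simp [hsp]
    exact this

-- the inner recursive helper go(s) of B
def pvB_go (s : List Char) : Option (List Char × List Char) :=
  let parts := PySem.Chars.splitOnMax s ['\n'] 1
  let line := parts.getD 0 []
  if PySem.Chars.startswith line ['#', ' '] then
    let rest := if parts.length = 2 then parts.getD 1 [] else []
    some (PySem.Chars.strip (PySem.Chars.slice line (some 2) none), PySem.Chars.strip rest)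
  else if parts.length = 1 then none
  else pvB_go (parts.getD 1 [])
termination_by s.length
decreasing_by exact pvSplitOnMax_getD_length' s (by assumption)

def split_title_body_py_alt (content : String) : String × String :=
  match pvB_go content.toList with
  | none => ("", String.ofList (PySem.Chars.strip content.toList))
  | some (t, b) => (String.ofList t, String.ofList b)

-- ===== PRECONDITION & SPEC =====
def Spec_split_title_body_py (content : String) (out : String × String) : Prop := out = split_title_body_py_alt content
instance (content : String) (out : String × String) : Decidable (Spec_split_title_body_py content out) := by unfold Spec_split_title_body_py; infer_instance

-- ===== CLAIM (what is proved, stated in full; the proofs are below) =====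
def Claim_equal_split_title_body_py : Prop := ∀ (content : String), Dom_split_title_body_py content → Spec_split_title_body_py content (split_title_body_py content)

-- ===== LEMMAS AND PROOFS =====
def pvLines : List Char → List (List Char)
  | [] => [[]]
  | a :: rest =>
    if a = '\n' then [] :: pvLines rest
    else match pvLines rest with
      | [] => [[a]]
      | h :: t => (a :: h) :: t

theorem pvLines_ne_nil (s : List Char) : pvLines s ≠ [] := by
  cases s with
  | nil => simp [pvLines]
  | cons a rest =>
    simp only [pvLines]
    split
    · simp
    · rcases h : pvLines rest with _ | ⟨hd, t⟩ <;> simp [h]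

theorem pvSplitOn_go_inv (l : List Char) : ∀ (fuel : Nat) (cur : List Char) (acc : List (List Char)),
    l.length ≤ fuel →
    PySem.Chars.splitOn.go ['\n'] fuel l cur acc =
      acc.reverse ++ (match pvLines l with
        | [] => []
        | hd :: t => (cur.reverse ++ hd) :: t) := by
  induction l with
  | nil =>
    intro fuel cur acc h
    cases fuel with
    | zero => rw [PySem.Chars.splitOn.go]; simp [pvLines]
    | succ f => rw [PySem.Chars.splitOn.go]; simp [pvLines]; omega
  | cons a rest ih =>
    intro fuel cur acc h
    cases fuel with
    | zero => simp at h
    | succ f =>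
      rw [PySem.Chars.splitOn.go]
      by_cases ha : a = '\n'
      · subst ha
        simp only [List.isPrefixOf, beq_self_eq_true, Bool.true_and, List.isPrefixOf_nil_left, if_true, List.length_singleton, List.drop_one, List.tail_cons]
        rw [ih f [] (cur.reverse :: acc) (by simpa using h)]
        rcases hr : pvLines rest with _ | ⟨hd, t⟩
        · exact absurd hr (pvLines_ne_nil rest)
        · simp [pvLines, hr]
      · simp only [List.isPrefixOf, Ne.symm ha, beq_iff_eq, Bool.and_eq_true, false_and, if_neg, reduceIte, Bool.false_and, if_false]
        rw [ih f (a :: cur) acc (by simpa using h)]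
        rcases hr : pvLines rest with _ | ⟨hd, t⟩
        · exact absurd hr (pvLines_ne_nil rest)
        · simp [pvLines, hr, ha]

theorem pvSplitOn_newline (s : List Char) : PySem.Chars.splitOn s ['\n'] = pvLines s := by
  rw [PySem.Chars.splitOn, pvSplitOn_go_inv s (s.length + 1) [] [] (by omega)]
  rcases hr : pvLines s with _ | ⟨hd, t⟩
  · exact absurd hr (pvLines_ne_nil s)
  · simp

theorem pvJoin_pvLines (s : List Char) : PySem.Chars.join ['\n'] (pvLines s) = s := by
  induction s with
  | nil => exact PySem.Chars.join_singleton ['\n'] []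
  | cons a rest ih =>
    by_cases ha : a = '\n'
    · subst ha
      simp only [pvLines, if_true, reduceIte]
      rcases hr : pvLines rest with _ | ⟨hd, t⟩
      · exact absurd hr (pvLines_ne_nil rest)
      · rw [PySem.Chars.join_cons_cons ['\n'] [] hd t, ← hr, ih]
        rfl
    · simp only [pvLines, ha, reduceIte, if_neg]
      rcases hr : pvLines rest with _ | ⟨hd, t⟩
      · exact absurd hr (pvLines_ne_nil rest)
      · rw [hr] at ih
        cases t with
        | nil => simp only [PySem.Chars.join_singleton] at ih ⊢; simp [ih]
        | cons y t' =>
          rw [PySem.Chars.join_cons_cons] at ih ⊢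
          simp only [List.cons_append]
          rw [ih]

theorem pvLines_splitOnce (s : List Char) :
    pvLines s = (match pvSplitOnce s with
      | (h, none) => [h]
      | (h, some t) => h :: pvLines t) := by
  induction s with
  | nil => simp [pvLines, pvSplitOnce]
  | cons a rest ih =>
    by_cases ha : a = '\n'
    · subst ha; simp [pvLines, pvSplitOnce]
    · simp only [pvLines, pvSplitOnce, ha, reduceIte, if_neg]
      rw [ih]
      rcases hsp : pvSplitOnce rest with ⟨h1, _ | t⟩ <;> simp [hsp]

theorem pvStrip_nil_all_space (bl : List Char) (h : PySem.Chars.strip bl = []) :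
    ∀ c ∈ bl, PySem.Chars.isspace c = true := by
  rw [PySem.Chars.strip, PySem.Chars.rstrip, PySem.Chars.lstrip] at h
  have h2 : List.dropWhile PySem.Chars.isspace (List.dropWhile PySem.Chars.isspace bl).reverse = [] := by
    simpa using h
  rw [List.dropWhile_eq_nil_iff] at h2
  intro c hc
  by_cases hcs : PySem.Chars.isspace c = true
  · exact hcs
  · exfalso
    have hbl : bl = List.takeWhile PySem.Chars.isspace bl ++ List.dropWhile PySem.Chars.isspace bl :=
      (List.takeWhile_append_dropWhile).symm
    rw [hbl] at hc
    rcases List.mem_append.1 hc with h3 | h3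
    · exact hcs (List.mem_takeWhile_imp h3)
    · exact hcs (h2 c (by simpa using h3))

theorem pvLstrip_append_space (bl x : List Char) (h : ∀ c ∈ bl, PySem.Chars.isspace c = true) :
    PySem.Chars.lstrip (bl ++ x) = PySem.Chars.lstrip x := by
  rw [PySem.Chars.lstrip, PySem.Chars.lstrip, List.dropWhile_append]
  have : List.dropWhile PySem.Chars.isspace bl = [] := List.dropWhile_eq_nil_iff.2 h
  simp [this]

theorem pvStrip_join_blank_cons (bl : List Char) (t : List (List Char))
    (hbl : PySem.Chars.strip bl = []) :
    PySem.Chars.strip (PySem.Chars.join ['\n'] (bl :: t)) =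
      PySem.Chars.strip (PySem.Chars.join ['\n'] t) := by
  have hsp := pvStrip_nil_all_space bl hbl
  cases t with
  | nil =>
    rw [PySem.Chars.join_singleton, PySem.Chars.join_nil, hbl]; rfl
  | cons y t' =>
    rw [PySem.Chars.join_cons_cons]
    rw [PySem.Chars.strip, PySem.Chars.strip]
    rw [List.append_assoc, pvLstrip_append_space bl _ hsp]
    have : PySem.Chars.lstrip (['\n'] ++ PySem.Chars.join ['\n'] (y :: t')) =
        PySem.Chars.lstrip (PySem.Chars.join ['\n'] (y :: t')) := by
      apply pvLstrip_append_space
      intro c hc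
      simp at hc
      subst hc
      decide
    rw [this]

theorem pvA_while_join (lines : List (List Char)) (b : Nat) :
    PySem.Chars.strip (PySem.Chars.join ['\n'] (lines.drop (pvA_while lines b))) =
      PySem.Chars.strip (PySem.Chars.join ['\n'] (lines.drop b)) := by
  induction b using pvA_while.induct (lines := lines) with
  | case1 b hcond ih =>
    rw [pvA_while, if_pos hcond, ih]
    obtain ⟨hlt, hstrip⟩ := hcond
    have hdrop : lines.drop b = lines[b] :: lines.drop (b + 1) := List.drop_eq_getElem_cons hlt
    rw [hdrop, pvStrip_join_blank_cons]
    rwa [List.getD_eq_getElem lines [] hlt] at hstrip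
  | case2 b hcond =>
    rw [pvA_while, if_neg hcond]

theorem pvSlice_two' (l : List Char) : PySem.List.slice l (some 2) none = l.drop 2 :=
  PySem.List.slice_from l (a := 2) (by norm_num)

theorem pvSlice_two (l : List Char) : PySem.Chars.slice l (some 2) none = l.drop 2 := by
  rw [PySem.Chars.slice_eq_listSlice]
  exact pvSlice_two' l

def pvHead : List (List Char) → Option (List Char × List Char)
  | [] => none
  | l :: t =>
    if PySem.Chars.startswith l ['#', ' '] then
      some (PySem.Chars.strip (l.drop 2), PySem.Chars.strip (PySem.Chars.join ['\n'] t))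
    else pvHead t

theorem pvA_for_none (lines : List (List Char)) (i : Nat) (rem : List (List Char))
    (h : ∀ l ∈ rem, PySem.Chars.startswith l ['#', ' '] = false) :
    pvA_for lines i rem = ([], 0) := by
  induction rem generalizing i with
  | nil => rfl
  | cons l rest ih =>
    rw [pvA_for, if_neg (by simp [h l (by simp)])]
    exact ih (i + 1) (fun x hx => h x (by simp [hx]))

theorem pvHead_none (rem : List (List Char))
    (h : ∀ l ∈ rem, PySem.Chars.startswith l ['#', ' '] = false) :
    pvHead rem = none := by
  induction rem with
  | nil => rfl
  | cons l rest ih =>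
    rw [pvHead, if_neg (by simp [h l (by simp)])]
    exact ih (fun x hx => h x (by simp [hx]))

theorem pvA_for_found (lines : List (List Char)) (i : Nat) (pre : List (List Char))
    (l : List Char) (post : List (List Char))
    (hpre : ∀ x ∈ pre, PySem.Chars.startswith x ['#', ' '] = false)
    (hl : PySem.Chars.startswith l ['#', ' '] = true) :
    pvA_for lines i (pre ++ l :: post) =
      (PySem.Chars.strip (l.drop 2), pvA_while lines (i + pre.length + 1)) := by
  induction pre generalizing i with
  | nil =>
    rw [List.nil_append, pvA_for, if_pos hl, pvSlice_two]
    simp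
  | cons x pre' ih =>
    rw [List.cons_append, pvA_for, if_neg (by simp [hpre x (by simp)])]
    rw [ih (i + 1) (fun y hy => hpre y (by simp [hy]))]
    congr 2
    simp
    omega

theorem pvHead_found (pre : List (List Char)) (l : List Char) (post : List (List Char))
    (hpre : ∀ x ∈ pre, PySem.Chars.startswith x ['#', ' '] = false)
    (hl : PySem.Chars.startswith l ['#', ' '] = true) :
    pvHead (pre ++ l :: post) =
      some (PySem.Chars.strip (l.drop 2), PySem.Chars.strip (PySem.Chars.join ['\n'] post)) := by
  induction pre with
  | nil => rw [List.nil_append, pvHead, if_pos hl]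
  | cons x pre' ih =>
    rw [List.cons_append, pvHead, if_neg (by simp [hpre x (by simp)])]
    exact ih (fun y hy => hpre y (by simp [hy]))

theorem pvB_go_eq_pvHead_aux : ∀ (n : Nat) (s : List Char), s.length ≤ n →
    pvB_go s = pvHead (pvLines s) := by
  intro n
  induction n with
  | zero =>
    intro s hs
    have hnil : s = [] := by cases s <;> simp_all
    subst hnil
    rw [pvB_go]
    simp only [pvSplitOnMax_one, pvLines_splitOnce, pvSplitOnce]
    by_cases hp : PySem.Chars.startswith [] ['#', ' '] = true <;> simp [hp, pvHead, pvSlice_two']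
  | succ n ih =>
    intro s hs
    rw [pvB_go]
    rw [pvLines_splitOnce]
    rcases hsp : pvSplitOnce s with ⟨h1, _ | t⟩
    · simp only [pvSplitOnMax_one, hsp]
      by_cases hp : PySem.Chars.startswith h1 ['#', ' '] = true
      · simp [hp, pvHead, pvSlice_two', PySem.Chars.join_nil]
      · simp [hp, pvHead]
    · simp only [pvSplitOnMax_one, hsp]
      have hlt : t.length < s.length := pvSplitOnce_some_length s t (by rw [hsp])
      by_cases hp : PySem.Chars.startswith h1 ['#', ' '] = true
      · simp [hp, pvHead, pvSlice_two', pvJoin_pvLines]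
      · have hrec := ih t (by omega)
        simp [hp, pvHead, hrec]

theorem pvB_go_eq_pvHead (s : List Char) : pvB_go s = pvHead (pvLines s) :=
  pvB_go_eq_pvHead_aux s.length s (le_refl _)

theorem pvDropWhile_cons_false {p : List Char → Bool} {xs l post}
    (h : List.dropWhile p xs = l :: post) : p l = false := by
  induction xs with
  | nil => simp at h
  | cons a t ih =>
    rw [List.dropWhile_cons] at h
    by_cases hp : p a = true
    · exact ih (by simpa [hp] using h)
    · simp [hp] at h
      obtain ⟨h1, _⟩ := h
      subst h1
      simpa using hp

theorem pvDrop_len_succ (pre : List (List Char)) (l : List Char) (post : List (List Char)) :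
    List.drop (pre.length + 1) (pre ++ l :: post) = post := by
  induction pre with
  | nil => simp
  | cons a t ih => simpa using ih

theorem pvA_char (s : List Char) :
    (let lines := pvLines s
     let r := pvA_for lines 0 lines
     (r.1, PySem.Chars.strip (PySem.Chars.join ['\n'] (lines.drop r.2)))) =
      (match pvHead (pvLines s) with
        | none => ([], PySem.Chars.strip s)
        | some p => p) := by
  by_cases hex : ∃ l ∈ pvLines s, PySem.Chars.startswith l ['#', ' '] = true
  · rcases hd : (pvLines s).dropWhile (fun x => !PySem.Chars.startswith x ['#', ' ']) with _ | ⟨l, post⟩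
    · exfalso
      obtain ⟨l, hmem, hl⟩ := hex
      have := List.dropWhile_eq_nil_iff.1 hd l hmem
      simp [hl] at this
    · have hl : PySem.Chars.startswith l ['#', ' '] = true := by
        have := pvDropWhile_cons_false hd
        simpa using this
      have hpre : ∀ x ∈ (pvLines s).takeWhile (fun x => !PySem.Chars.startswith x ['#', ' ']),
          PySem.Chars.startswith x ['#', ' '] = false := by
        intro x hx
        have := List.mem_takeWhile_imp hx
        simpa using this
      have hs : pvLines s = (pvLines s).takeWhile (fun x => !PySem.Chars.startswith x ['#', ' ']) ++ l :: post := by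
        conv_lhs => rw [← List.takeWhile_append_dropWhile (p := fun x => !PySem.Chars.startswith x ['#', ' ']) (l := pvLines s)]
        rw [hd]
      simp only []
      rw [hs, pvA_for_found _ 0 _ l post hpre hl, pvHead_found _ l post hpre hl]
      simp only [Nat.zero_add]
      rw [pvA_while_join, pvDrop_len_succ]
  · push_neg at hex
    have hall : ∀ l ∈ pvLines s, PySem.Chars.startswith l ['#', ' '] = false := by
      intro l hm
      have := hex l hm
      simpa using this
    simp only []
    rw [pvA_for_none _ 0 _ hall, pvHead_none _ hall]
    simp [pvJoin_pvLines]

-- ===== VERDICT (by name: the statement is the Claim_ definition above) =====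
theorem split_title_body_py_spec : Claim_equal_split_title_body_py := by
  intro content _
  unfold Spec_split_title_body_py split_title_body_py split_title_body_py_alt
  rw [pvSplitOn_newline, pvB_go_eq_pvHead]
  have h := pvA_char content.toList
  simp only [] at h
  rcases hh : pvHead (pvLines content.toList) with _ | ⟨t, b⟩ <;> rw [hh] at h <;>
    rw [Prod.mk.injEq] at h
  · show (String.ofList (pvA_for (pvLines content.toList) 0 (pvLines content.toList)).1,
          String.ofList (PySem.Chars.strip (PySem.Chars.join ['\n']
            (List.drop (pvA_for (pvLines content.toList) 0 (pvLines content.toList)).2 (pvLines content.toList))))) =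
        ("", String.ofList (PySem.Chars.strip content.toList))
    rw [h.1, h.2]
  · show (String.ofList (pvA_for (pvLines content.toList) 0 (pvLines content.toList)).1,
          String.ofList (PySem.Chars.strip (PySem.Chars.join ['\n']
            (List.drop (pvA_for (pvLines content.toList) 0 (pvLines content.toList)).2 (pvLines content.toList))))) =
        (String.ofList t, String.ofList b)
    rw [h.1, h.2]
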